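-- pv_equiv track=rewrite | github.com/DSturgis23/chickpea-reports | eviivo.py | _channel_from_email
-- ===== SOURCE A (Python) =====
-- _OTA_EMAIL_MAP = [
--     # OTAs — confirmed from live booking data
--     ("guest.booking.com",           "Booking.com"),
--     ("m.expediapartnercentral.com", "Expedia"),
--     ("agoda-messaging.com",         "Agoda"),
--     ("guest.trip.com",              "Trip.com"),
--     # OTAs — standard domains (not yet confirmed in data but widely used)
--     ("airbnb.com",                  "Airbnb"),
--     ("tripadvisor.com",             "TripAdvisor"),
--     ("hotelbeds.com",               "HotelBeds"),
--     ("hrs.com",                     "HRS"),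
--     ("laterooms.com",               "LateRooms"),
--     ("expedia.com",                 "Expedia"),
--     # Corporate travel agencies — confirmed from live booking data
--     ("travelctm.com",               "CTM (Corporate Travel)"),
--     ("amexgbt.com",                 "Amex Global Business Travel"),
--     ("agiito.com",                  "Agiito (Corporate Travel)"),
--     ("travelperktrips.com",         "TravelPerk (Corporate)"),
--     ("keytravel.com",               "Key Travel (Corporate)"),
--     ("clydetravel.com",             "Clyde Travel (Corporate)"),
--     ("inntel.co.uk",                "Inntel (Corporate)"),
--     ("stewarttravelmanagement.com", "Stewart Travel (Corporate)"),
--     ("bookings.roomex.com",         "Roomex (Corporate)"),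
-- ]
--
-- def _channel_from_email(email: str) -> str:
--     """Infer booking channel from guest email domain."""
--     if not email or "@" not in email:
--         return "Direct / Phone"
--     domain = email.split("@", 1)[-1].lower()
--     for ota_domain, name in _OTA_EMAIL_MAP:
--         if domain == ota_domain or domain.endswith("." + ota_domain):
--             return name
--     return "Direct / Phone"
-- ===== SOURCE B (Python) =====
-- _OTA_CHANNEL = {
--     "guest.booking.com":           "Booking.com",
--     "m.expediapartnercentral.com": "Expedia",
--     "agoda-messaging.com":         "Agoda",
--     "guest.trip.com":              "Trip.com",
--     "airbnb.com":                  "Airbnb",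
--     "tripadvisor.com":             "TripAdvisor",
--     "hotelbeds.com":               "HotelBeds",
--     "hrs.com":                     "HRS",
--     "laterooms.com":               "LateRooms",
--     "expedia.com":                 "Expedia",
--     "travelctm.com":               "CTM (Corporate Travel)",
--     "amexgbt.com":                 "Amex Global Business Travel",
--     "agiito.com":                  "Agiito (Corporate Travel)",
--     "travelperktrips.com":         "TravelPerk (Corporate)",
--     "keytravel.com":               "Key Travel (Corporate)",
--     "clydetravel.com":             "Clyde Travel (Corporate)",
--     "inntel.co.uk":                "Inntel (Corporate)",
--     "stewarttravelmanagement.com": "Stewart Travel (Corporate)",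
--     "bookings.roomex.com":         "Roomex (Corporate)",
-- }
--
-- def _channel_from_email(email: str) -> str:
--     """Infer booking channel from guest email domain."""
--     if not email or "@" not in email:
--         return "Direct / Phone"
--     s = email.split("@", 1)[-1].lower()
--     while True:
--         name = _OTA_CHANNEL.get(s)
--         if name is not None:
--             return name
--         i = s.find(".")
--         if i == -1:
--             return "Direct / Phone"
--         s = s[i + 1:]
-- ===== Notes on version B (the rewrite author's own statement) =====
-- stated objective: idiomatic
-- what changed: Replaces A's linear scan over all OTA map entries (string-equal or endswith test per entry) with a single domain-to-channel dict probed along the label-boundary suffixes of the input domain (drop the leftmost label until a hit or no dot remains); correct because no map key is a label-suffix of another, so at most one entry can ever match.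
import Mathlib
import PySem

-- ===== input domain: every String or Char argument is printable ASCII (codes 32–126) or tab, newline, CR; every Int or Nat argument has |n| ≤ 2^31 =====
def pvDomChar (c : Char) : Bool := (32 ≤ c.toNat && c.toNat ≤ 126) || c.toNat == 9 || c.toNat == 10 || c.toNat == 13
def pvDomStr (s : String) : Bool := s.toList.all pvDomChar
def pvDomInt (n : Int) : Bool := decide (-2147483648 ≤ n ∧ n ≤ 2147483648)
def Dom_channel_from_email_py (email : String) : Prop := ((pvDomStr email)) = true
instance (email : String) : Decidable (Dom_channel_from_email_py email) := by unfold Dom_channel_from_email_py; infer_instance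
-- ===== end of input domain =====

-- B replaces A's linear scan of all OTA map entries (each doing an endswith test) by a single
-- domain→channel dict probed along the label-boundary suffixes of the input domain (idiomatic table walk).


-- ===== PORT A =====
def pvOtaEmailMap : List (String × String) := [
    ("guest.booking.com",           "Booking.com"),
    ("m.expediapartnercentral.com", "Expedia"),
    ("agoda-messaging.com",         "Agoda"),
    ("guest.trip.com",              "Trip.com"),
    ("airbnb.com",                  "Airbnb"),
    ("tripadvisor.com",             "TripAdvisor"),
    ("hotelbeds.com",               "HotelBeds"),
    ("hrs.com",                     "HRS"),
    ("laterooms.com",               "LateRooms"),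
    ("expedia.com",                 "Expedia"),
    ("travelctm.com",               "CTM (Corporate Travel)"),
    ("amexgbt.com",                 "Amex Global Business Travel"),
    ("agiito.com",                  "Agiito (Corporate Travel)"),
    ("travelperktrips.com",         "TravelPerk (Corporate)"),
    ("keytravel.com",               "Key Travel (Corporate)"),
    ("clydetravel.com",             "Clyde Travel (Corporate)"),
    ("inntel.co.uk",                "Inntel (Corporate)"),
    ("stewarttravelmanagement.com", "Stewart Travel (Corporate)"),
    ("bookings.roomex.com",         "Roomex (Corporate)")]

-- A's for-loop over the map entries
def pvScanOta (domain : String) : List (String × String) → String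
  | [] => "Direct / Phone"
  | (ota, name) :: rest =>
      if domain == ota || PySem.Str.endswith domain ("." ++ ota) then name
      else pvScanOta domain rest

def channel_from_email_py (email : String) : String :=
  if email == "" || !(PySem.Str.isIn "@" email) then "Direct / Phone"
  else
    let domain := PySem.Str.lower
      ((PySem.List.pyGet? ((PySem.Str.splitMax? email "@" 1).getD []) (-1)).getD "")
    pvScanOta domain pvOtaEmailMap

-- ===== PORT B =====
def pvOtaChannel : PySem.Dict String String := PySem.Dict.ofList [
    ("guest.booking.com",           "Booking.com"),
    ("m.expediapartnercentral.com", "Expedia"),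
    ("agoda-messaging.com",         "Agoda"),
    ("guest.trip.com",              "Trip.com"),
    ("airbnb.com",                  "Airbnb"),
    ("tripadvisor.com",             "TripAdvisor"),
    ("hotelbeds.com",               "HotelBeds"),
    ("hrs.com",                     "HRS"),
    ("laterooms.com",               "LateRooms"),
    ("expedia.com",                 "Expedia"),
    ("travelctm.com",               "CTM (Corporate Travel)"),
    ("amexgbt.com",                 "Amex Global Business Travel"),
    ("agiito.com",                  "Agiito (Corporate Travel)"),
    ("travelperktrips.com",         "TravelPerk (Corporate)"),
    ("keytravel.com",               "Key Travel (Corporate)"),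
    ("clydetravel.com",             "Clyde Travel (Corporate)"),
    ("inntel.co.uk",                "Inntel (Corporate)"),
    ("stewarttravelmanagement.com", "Stewart Travel (Corporate)"),
    ("bookings.roomex.com",         "Roomex (Corporate)")]

-- B's while-loop: probe the table at s, else drop the leftmost label (s = s[i+1:], i = s.find('.'))
def pvWalkSuffixes (s : List Char) : String :=
  match pvOtaChannel.get? (String.ofList s) with
  | some name => name
  | none =>
    let i := PySem.Chars.find s ['.']
    if i = -1 then "Direct / Phone"
    else pvWalkSuffixes (PySem.List.slice s (some (i + 1)) none)
termination_by s.length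
decreasing_by
  have hle := PySem.Chars.find_le_length s ['.']
  have h0 : 0 ≤ PySem.Chars.find s ['.'] := by
    have := PySem.Chars.neg_one_le_find s ['.']; omega
  have hsp := (PySem.Chars.find_spec (s := s) (sub := ['.']) h0).1
  have hlt : (PySem.Chars.find s ['.']).toNat < s.length := by
    rcases hsp with ⟨t, ht⟩
    have := congrArg List.length ht
    simp [List.length_drop] at this
    omega
  rw [PySem.List.slice_from _ (by omega)]
  simp [List.length_drop]
  omega

def channel_from_email_py_alt (email : String) : String :=
  if email == "" || !(PySem.Str.isIn "@" email) then "Direct / Phone"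
  else
    let s := PySem.Str.lower
      ((PySem.List.pyGet? ((PySem.Str.splitMax? email "@" 1).getD []) (-1)).getD "")
    pvWalkSuffixes s.toList

-- ===== PRECONDITION & SPEC =====
def Spec_channel_from_email_py (email : String) (out : String) : Prop := out = channel_from_email_py_alt email
instance (email : String) (out : String) : Decidable (Spec_channel_from_email_py email out) := by unfold Spec_channel_from_email_py; infer_instance

-- ===== CLAIM (what is proved, stated in full; the proofs are below) =====
def Claim_equal_channel_from_email_py : Prop := ∀ (email : String), Dom_channel_from_email_py email → Spec_channel_from_email_py email (channel_from_email_py email)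

-- ===== LEMMAS AND PROOFS =====

-- "key k matches domain d" — the condition A tests entry-wise, and (see pv_mem_iff_matches-style
-- lemmas below) exactly "k is a label-boundary suffix of d", the set of strings B probes.
def pvMatches (d k : List Char) : Prop := k = d ∨ ('.' :: k) <:+ d

def pvKeysC : List (List Char) := pvOtaEmailMap.map (fun p => p.1.toList)

theorem pvMatches_refl (d : List Char) : pvMatches d d := Or.inl rfl

-- the character at the first '.' : d.drop i = '.' :: d.drop (i+1)
theorem pv_drop_find (d : List Char) (h0 : 0 ≤ PySem.Chars.find d ['.']) :
    d.drop (PySem.Chars.find d ['.']).toNat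
      = '.' :: d.drop ((PySem.Chars.find d ['.']).toNat + 1) := by
  rcases (PySem.Chars.find_spec (s := d) (sub := ['.']) h0).1 with ⟨t, ht⟩
  have ht' : d.drop (PySem.Chars.find d ['.']).toNat = '.' :: t := by simpa using ht.symm
  have : d.drop ((PySem.Chars.find d ['.']).toNat + 1)
      = List.drop 1 (d.drop (PySem.Chars.find d ['.']).toNat) := by
    rw [List.drop_drop]
  rw [this, ht']
  simp

-- any dot-suffix of d survives dropping everything up to (and incl.) the first dot's position
theorem pv_suffix_dot_drop {d k : List Char} (hs : ('.' :: k) <:+ d) :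
    ('.' :: k) <:+ d.drop (PySem.Chars.find d ['.']).toNat := by
  have hinf : ['.'] <:+: d := ((show ['.'] <+: ('.' :: k) from ⟨k, rfl⟩).isInfix).trans hs.isInfix
  have h0 : 0 ≤ PySem.Chars.find d ['.'] := (PySem.Chars.find_nonneg_iff d ['.']).2 hinf
  rcases hs with ⟨pre, hpre⟩
  have hdp : d.drop pre.length = '.' :: k := by rw [← hpre, List.drop_left]
  have hple : (PySem.Chars.find d ['.']).toNat ≤ pre.length := by
    by_contra hc
    exact (PySem.Chars.find_spec (s := d) (sub := ['.']) h0).2 pre.length (by omega)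
      (by rw [hdp]; exact ⟨k, rfl⟩)
  have : d.drop pre.length
      = (d.drop (PySem.Chars.find d ['.']).toNat).drop (pre.length - (PySem.Chars.find d ['.']).toNat) := by
    rw [List.drop_drop]; congr 1; omega
  rw [← hdp, this]
  exact List.drop_suffix _ _
-- (the minimality part of find_spec is what rules out positions before the first dot)

theorem pv_matches_step {d k : List Char} (h0 : 0 ≤ PySem.Chars.find d ['.'])
    (hk : pvMatches (d.drop ((PySem.Chars.find d ['.']).toNat + 1)) k) : pvMatches d k := by
  have hdot : ('.' :: d.drop ((PySem.Chars.find d ['.']).toNat + 1)) <:+ d := by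
    rw [← pv_drop_find d h0]; exact List.drop_suffix _ _
  rcases hk with rfl | hsuf
  · exact Or.inr hdot
  · exact Or.inr (hsuf.trans ((List.suffix_cons _ _).trans hdot))

theorem pv_step_matches {d k : List Char} (hs : ('.' :: k) <:+ d) :
    pvMatches (d.drop ((PySem.Chars.find d ['.']).toNat + 1)) k := by
  have hinf : ['.'] <:+: d := ((show ['.'] <+: ('.' :: k) from ⟨k, rfl⟩).isInfix).trans hs.isInfix
  have h0 : 0 ≤ PySem.Chars.find d ['.'] := (PySem.Chars.find_nonneg_iff d ['.']).2 hinf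
  have h1 := pv_suffix_dot_drop hs
  rw [pv_drop_find d h0] at h1
  rcases h1 with ⟨q, hq⟩
  cases q with
  | nil => exact Or.inl (by simpa using hq)
  | cons c q' =>
      refine Or.inr ⟨q', ?_⟩
      have := hq
      simp only [List.cons_append] at this
      exact (List.cons.injEq _ _ _ _ ▸ this).2

-- two distinct dot-suffixes of the same string: the shorter one is a dot-suffix of the longer
theorem pv_ss_lt {d k1 k2 : List Char} (h1 : ('.' :: k1) <:+ d) (h2 : ('.' :: k2) <:+ d)
    (hlt : k1.length < k2.length) : ('.' :: k1) <:+ k2 := by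
  rcases h1 with ⟨p1, hp1⟩
  rcases h2 with ⟨p2, hp2⟩
  have hd1 : d.drop p1.length = '.' :: k1 := by rw [← hp1, List.drop_left]
  have hd2 : d.drop p2.length = '.' :: k2 := by rw [← hp2, List.drop_left]
  have hl1 := congrArg List.length hp1
  have hl2 := congrArg List.length hp2
  simp only [List.length_append, List.length_cons] at hl1 hl2
  have hplt : p2.length < p1.length := by omega
  have : d.drop p1.length = (d.drop p2.length).drop (p1.length - p2.length) := by
    rw [List.drop_drop]; congr 1; omega
  rw [hd1, hd2] at this
  have hstep : ('.' :: k1) <:+ ('.' :: k2) := this ▸ List.drop_suffix _ _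
  rcases hstep with ⟨q, hq⟩
  cases q with
  | nil =>
      have := congrArg List.length hq
      simp only [List.nil_append, List.length_cons] at this
      omega
  | cons c q' =>
      refine ⟨q', ?_⟩
      simp only [List.cons_append] at hq
      exact (List.cons.injEq _ _ _ _ ▸ hq).2

theorem pv_keys_pairwise :
    ∀ k1 ∈ pvKeysC, ∀ k2 ∈ pvKeysC, k1 ≠ k2 → ¬(('.' :: k1) <:+ k2) := by decide

-- at most one map key matches any given domain (no key is a label-suffix of another)
theorem pv_key_unique {d k1 k2 : List Char} (hk1 : k1 ∈ pvKeysC) (hk2 : k2 ∈ pvKeysC)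
    (hm1 : pvMatches d k1) (hm2 : pvMatches d k2) : k1 = k2 := by
  by_contra hne
  rcases hm1 with rfl | hs1
  · rcases hm2 with rfl | hs2
    · exact hne rfl
    · exact pv_keys_pairwise k2 hk2 k1 hk1 (Ne.symm hne) hs2
  · rcases hm2 with rfl | hs2
    · exact pv_keys_pairwise k1 hk1 k2 hk2 hne hs1
    · rcases lt_trichotomy k1.length k2.length with h | h | h
      · exact pv_keys_pairwise k1 hk1 k2 hk2 hne (pv_ss_lt hs1 hs2 h)
      · rcases hs1 with ⟨p1, hp1⟩
        rcases hs2 with ⟨p2, hp2⟩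
        have hd1 : d.drop p1.length = '.' :: k1 := by rw [← hp1, List.drop_left]
        have hd2 : d.drop p2.length = '.' :: k2 := by rw [← hp2, List.drop_left]
        have hl1 := congrArg List.length hp1
        have hl2 := congrArg List.length hp2
        simp only [List.length_append, List.length_cons] at hl1 hl2
        have : p1.length = p2.length := by omega
        rw [← this, hd1] at hd2
        exact hne (by simpa using hd2)
      · exact pv_keys_pairwise k2 hk2 k1 hk1 (Ne.symm hne) (pv_ss_lt hs2 hs1 h)

-- concrete facts about B's table
theorem pv_get_of_mem : ∀ p ∈ pvOtaEmailMap, pvOtaChannel.get? p.1 = some p.2 := by decide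
theorem pv_keys_eq : pvOtaChannel.keys = pvOtaEmailMap.map Prod.fst := by decide
theorem pv_map_nodup : (pvOtaEmailMap.map Prod.fst).Nodup := by decide

theorem pv_mem_keysC {k : List Char} (h : String.ofList k ∈ pvOtaChannel.keys) :
    ∃ p ∈ pvOtaEmailMap, p.1.toList = k := by
  rw [pv_keys_eq] at h
  rcases List.mem_map.1 h with ⟨p, hp, hpk⟩
  exact ⟨p, hp, by rw [hpk]; exact String.toList_ofList⟩

-- A's loop condition ↔ pvMatches
theorem pv_cond_iff (domain k : String) :
    (domain == k || PySem.Str.endswith domain ("." ++ k)) = true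
      ↔ pvMatches domain.toList k.toList := by
  have hdot : ("." ++ k).toList = '.' :: k.toList := by
    rw [String.toList_append]; rfl
  constructor
  · intro h
    rcases Bool.or_eq_true_iff.1 h with h | h
    · exact Or.inl (by rw [eq_of_beq h])
    · refine Or.inr ?_
      have := (PySem.Chars.endswith_iff _ _).1 (by rw [← PySem.Str.endswith_eq, h])
      rwa [hdot] at this
  · intro h
    rcases h with h | h
    · exact Bool.or_eq_true_iff.2 (Or.inl (beq_iff_eq.2 (String.toList_inj.1 h.symm)))
    · refine Bool.or_eq_true_iff.2 (Or.inr ?_)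
      rw [PySem.Str.endswith_eq]
      exact (PySem.Chars.endswith_iff _ _).2 (by rwa [hdot])

theorem pv_scan_default (domain : String) :
    ∀ M : List (String × String), (∀ p ∈ M, ¬ pvMatches domain.toList p.1.toList) →
      pvScanOta domain M = "Direct / Phone" := by
  intro M
  induction M with
  | nil => intro _; rfl
  | cons p rest ih =>
      intro h
      obtain ⟨ota, name⟩ := p
      have hc : (domain == ota || PySem.Str.endswith domain ("." ++ ota)) = false := by
        by_contra hc
        exact h (ota, name) (List.mem_cons_self)
          ((pv_cond_iff domain ota).1 (Bool.of_not_eq_false hc))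
      simp only [pvScanOta, hc, Bool.false_eq_true, if_false]
      exact ih (fun q hq => h q (List.mem_cons_of_mem _ hq))

theorem pv_scan_hit (domain : String) (k v : String) :
    ∀ M : List (String × String), (k, v) ∈ M → (M.map Prod.fst).Nodup →
      pvMatches domain.toList k.toList →
      (∀ p ∈ M, pvMatches domain.toList p.1.toList → p.1 = k) →
      pvScanOta domain M = v := by
  intro M
  induction M with
  | nil => intro h; cases h
  | cons p rest ih =>
      intro hmem hnd hm huniq
      obtain ⟨ota, name⟩ := p
      by_cases hc : (domain == ota || PySem.Str.endswith domain ("." ++ ota)) = true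
      · have hko : ota = k := huniq (ota, name) List.mem_cons_self ((pv_cond_iff domain ota).1 hc)
        subst hko
        have hv : name = v := by
          rcases List.mem_cons.1 hmem with h | h
          · exact (congrArg Prod.snd h).symm
          · exfalso
            have : ota ∈ rest.map Prod.fst := List.mem_map.2 ⟨(ota, v), h, rfl⟩
            exact (List.nodup_cons.1 (by simpa using hnd)).1 this
        simp only [pvScanOta, hc, if_true, hv]
      · have hcf : (domain == ota || PySem.Str.endswith domain ("." ++ ota)) = false :=
          Bool.not_eq_true _ ▸ hc
        have hko : ota ≠ k := fun he => hc ((pv_cond_iff domain ota).2 (he ▸ hm))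
        have hmem' : (k, v) ∈ rest := by
          rcases List.mem_cons.1 hmem with h | h
          · exact absurd (congrArg Prod.fst h).symm hko
          · exact h
        simp only [pvScanOta, hcf, Bool.false_eq_true, if_false]
        exact ih hmem' (List.nodup_cons.1 (by simpa using hnd)).2 hm
          (fun q hq => huniq q (List.mem_cons_of_mem _ hq))

theorem pv_walk_default : ∀ (n : Nat) (d : List Char), d.length ≤ n →
    (∀ k, pvMatches d k → pvOtaChannel.get? (String.ofList k) = none) →
    pvWalkSuffixes d = "Direct / Phone" := by
  intro n
  induction n with
  | zero =>
      intro d hd h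
      have hnil : d = [] := List.length_eq_zero_iff.1 (Nat.le_zero.1 hd)
      subst hnil
      rw [pvWalkSuffixes, h [] (pvMatches_refl [])]
      have hf : PySem.Chars.find ([] : List Char) ['.'] = -1 := by decide
      simp [hf]
  | succ n ih =>
      intro d hd h
      rw [pvWalkSuffixes, h d (pvMatches_refl d)]
      by_cases hf : PySem.Chars.find d ['.'] = -1
      · simp [hf]
      · have h0 : 0 ≤ PySem.Chars.find d ['.'] := by
          have := PySem.Chars.neg_one_le_find d ['.']; omega
        simp only [hf, if_false]
        rw [PySem.List.slice_from _ (by omega)]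
        have hi1 : (PySem.Chars.find d ['.'] + 1).toNat = (PySem.Chars.find d ['.']).toNat + 1 := by
          omega
        rw [hi1]
        have hlt : (PySem.Chars.find d ['.']).toNat < d.length := by
          rcases (PySem.Chars.find_spec (s := d) (sub := ['.']) h0).1 with ⟨t, ht⟩
          have := congrArg List.length ht
          simp [List.length_drop] at this
          omega
        exact ih _ (by simp [List.length_drop]; omega)
          (fun k hk => h k (pv_matches_step h0 hk))

theorem pv_walk_hit : ∀ (n : Nat) (d : List Char) (k : List Char) (v : String), d.length ≤ n →
    pvMatches d k → pvOtaChannel.get? (String.ofList k) = some v →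
    (∀ k', pvMatches d k' → k' ≠ k → pvOtaChannel.get? (String.ofList k') = none) →
    pvWalkSuffixes d = v := by
  intro n
  induction n with
  | zero =>
      intro d k v hd hm hget huniq
      have hnil : d = [] := List.length_eq_zero_iff.1 (Nat.le_zero.1 hd)
      subst hnil
      have hk : k = [] := by
        by_contra hne
        rcases hm with h | ⟨p, hp⟩
        · exact hne h
        · simpa using congrArg List.length hp
      subst hk
      rw [pvWalkSuffixes, hget]
  | succ n ih =>
      intro d k v hd hm hget huniq
      by_cases hdk : d = k
      · subst hdk
        rw [pvWalkSuffixes, hget]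
      · have hs : ('.' :: k) <:+ d := by
          rcases hm with h | h
          · exact absurd h.symm hdk
          · exact h
        have hdnone : pvOtaChannel.get? (String.ofList d) = none :=
          huniq d (pvMatches_refl d) hdk
        have hinf : ['.'] <:+: d := ((show ['.'] <+: ('.' :: k) from ⟨k, rfl⟩).isInfix).trans hs.isInfix
        have h0 : 0 ≤ PySem.Chars.find d ['.'] := (PySem.Chars.find_nonneg_iff d ['.']).2 hinf
        rw [pvWalkSuffixes, hdnone]
        have hf : ¬ PySem.Chars.find d ['.'] = -1 := by omega
        simp only [hf, if_false]
        rw [PySem.List.slice_from _ (by omega)]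
        have hi1 : (PySem.Chars.find d ['.'] + 1).toNat = (PySem.Chars.find d ['.']).toNat + 1 := by
          omega
        rw [hi1]
        have hlt : (PySem.Chars.find d ['.']).toNat < d.length := by
          rcases (PySem.Chars.find_spec (s := d) (sub := ['.']) h0).1 with ⟨t, ht⟩
          have := congrArg List.length ht
          simp [List.length_drop] at this
          omega
        exact ih _ k v (by simp [List.length_drop]; omega) (pv_step_matches hs) hget
          (fun k' hk' hne => huniq k' (pv_matches_step h0 hk') hne)

-- the heart of the equivalence: A's scan and B's suffix walk agree on every domain string
theorem pv_main (domain : String) :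
    pvScanOta domain pvOtaEmailMap = pvWalkSuffixes domain.toList := by
  by_cases h : ∃ p ∈ pvOtaEmailMap, pvMatches domain.toList p.1.toList
  · rcases h with ⟨p, hp, hm⟩
    have hkC : p.1.toList ∈ pvKeysC := List.mem_map.2 ⟨p, hp, rfl⟩
    have huniqS : ∀ q ∈ pvOtaEmailMap, pvMatches domain.toList q.1.toList → q.1 = p.1 := by
      intro q hq hqm
      exact String.toList_inj.1
        (pv_key_unique (List.mem_map.2 ⟨q, hq, rfl⟩) hkC hqm hm)
    rw [pv_scan_hit domain p.1 p.2 pvOtaEmailMap (by simpa using hp) pv_map_nodup hm huniqS]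
    refine (pv_walk_hit domain.toList.length domain.toList p.1.toList p.2 le_rfl hm ?_ ?_).symm
    · rw [String.ofList_toList]; exact pv_get_of_mem p hp
    · intro k' hk' hne
      rw [PySem.Dict.get?_eq_none_iff_not_mem_keys]
      intro hmem
      rcases pv_mem_keysC hmem with ⟨q, hq, hqk⟩
      exact hne (by rw [← hqk, huniqS q hq (hqk ▸ hk')])
  · rw [pv_scan_default domain pvOtaEmailMap (fun p hp hm => h ⟨p, hp, hm⟩)]
    refine (pv_walk_default domain.toList.length domain.toList le_rfl ?_).symm
    intro k hk
    rw [PySem.Dict.get?_eq_none_iff_not_mem_keys]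
    intro hmem
    rcases pv_mem_keysC hmem with ⟨q, hq, hqk⟩
    exact h ⟨q, hq, hqk ▸ hk⟩

-- ===== VERDICT (by name: the statement is the Claim_ definition above) =====
theorem channel_from_email_py_spec : Claim_equal_channel_from_email_py := by
  intro email _
  unfold Spec_channel_from_email_py channel_from_email_py channel_from_email_py_alt
  by_cases hg : (email == "" || !(PySem.Str.isIn "@" email)) = true
  · simp only [hg, if_true]
  · simp only [hg, Bool.false_eq_true, if_false]
    exact pv_main _
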